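-- pv_equiv track=rewrite | github.com/denialofsandwich/pythapi | plugins/lets_encrypt.py | i_domain_permission_validator
-- ===== SOURCE A (Python) =====
-- def i_domain_permission_validator(ruleset, rule_section, target_domain):
--     if not rule_section in ruleset:
--         return 0
--
--     domain_list = ruleset[rule_section]
--
--     if '*' in domain_list:
--         return 1
--
--     domain_r = target_domain.split('.')
--
--     for i_domain in domain_list:
--         i_domain_r = i_domain.split('.')
--
--         if target_domain == i_domain:
--             return 1
--
--         elif i_domain_r[0] == '*' and '.'.join(domain_r[1:]) == '.'.join(i_domain_r[1:]):
--             return 1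
--
--     return 0
-- ===== SOURCE B (Python) =====
-- def i_domain_permission_validator(ruleset, rule_section, target_domain):
--     # Reverse lookup: instead of parsing every rule, derive the only patterns
--     # that could match the target and test those for membership.
--     if rule_section not in ruleset:
--         return 0
--     domain_list = ruleset[rule_section]
--     parent = '.'.join(target_domain.split('.')[1:])
--     candidates = ('*', target_domain, '.'.join(['*', parent]))
--     return 1 if any(c in domain_list for c in candidates) else 0
-- ===== Notes on version B (the rewrite author's own statement) =====
-- stated objective: alternative
-- what changed: Inverts the matching direction: instead of scanning the rule list and splitting/rejoining every entry against the target, B derives the at-most-three patterns that could possibly match the target ('*', the domain itself, and '*.'+parent) and answers by membership tests, never parsing any rule entry.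
import Mathlib
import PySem

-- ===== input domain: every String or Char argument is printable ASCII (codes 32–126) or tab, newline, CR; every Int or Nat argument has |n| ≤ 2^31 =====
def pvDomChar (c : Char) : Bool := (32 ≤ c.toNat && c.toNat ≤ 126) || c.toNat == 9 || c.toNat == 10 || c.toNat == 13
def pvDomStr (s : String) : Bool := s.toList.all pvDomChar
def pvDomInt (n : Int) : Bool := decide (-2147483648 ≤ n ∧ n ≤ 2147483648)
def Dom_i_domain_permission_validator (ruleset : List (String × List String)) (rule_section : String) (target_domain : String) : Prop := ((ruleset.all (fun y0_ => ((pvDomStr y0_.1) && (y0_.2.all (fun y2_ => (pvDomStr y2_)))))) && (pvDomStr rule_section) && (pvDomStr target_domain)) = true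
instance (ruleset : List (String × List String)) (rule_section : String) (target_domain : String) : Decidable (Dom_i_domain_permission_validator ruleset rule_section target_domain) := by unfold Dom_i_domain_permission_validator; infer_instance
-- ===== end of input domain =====

-- B reverses the matching direction: instead of scanning the rule list and splitting
-- every entry, it derives the (at most three) patterns that could match the target
-- ('*', the domain itself, '*.'+parent) and answers by membership tests (alternative).

-- ===== PORT A =====
-- the 'for i_domain in domain_list' loop of A, with domain_r precomputed as in A
def pvLoopA (domain_r : List String) (target_domain : String) : List String → Int
  | [] => 0
  | i_domain :: rest =>
    let i_domain_r := (PySem.Str.split? i_domain ".").getD []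
    if target_domain == i_domain then 1
    else if i_domain_r.headD "" == "*" &&
        (PySem.Str.join "." (domain_r.drop 1) == PySem.Str.join "." (i_domain_r.drop 1)) then 1
    else pvLoopA domain_r target_domain rest

def i_domain_permission_validator (ruleset : List (String × List String)) (rule_section : String) (target_domain : String) : Int :=
  let d := PySem.Dict.mk ruleset
  if !(d.contains rule_section) then 0
  else
    let domain_list := d.getD rule_section []
    if domain_list.contains "*" then 1
    else
      let domain_r := (PySem.Str.split? target_domain ".").getD []
      pvLoopA domain_r target_domain domain_list

-- ===== PORT B =====
def i_domain_permission_validator_alt (ruleset : List (String × List String)) (rule_section : String) (target_domain : String) : Int :=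
  let d := PySem.Dict.mk ruleset
  if !(d.contains rule_section) then 0
  else
    let domain_list := d.getD rule_section []
    let parent := PySem.Str.join "." (((PySem.Str.split? target_domain ".").getD []).drop 1)
    let candidates := ["*", target_domain, PySem.Str.join "." ["*", parent]]
    if candidates.any (fun c => domain_list.contains c) then 1 else 0

-- ===== PRECONDITION & SPEC =====
def Spec_i_domain_permission_validator (ruleset : List (String × List String)) (rule_section : String) (target_domain : String) (out : Int) : Prop := out = i_domain_permission_validator_alt ruleset rule_section target_domain
instance (ruleset : List (String × List String)) (rule_section : String) (target_domain : String) (out : Int) : Decidable (Spec_i_domain_permission_validator ruleset rule_section target_domain out) := by unfold Spec_i_domain_permission_validator; infer_instance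

-- ===== CLAIM (what is proved, stated in full; the proofs are below) =====
def Claim_equal_i_domain_permission_validator : Prop := ∀ (ruleset : List (String × List String)) (rule_section : String) (target_domain : String), Dom_i_domain_permission_validator ruleset rule_section target_domain → Spec_i_domain_permission_validator ruleset rule_section target_domain (i_domain_permission_validator ruleset rule_section target_domain)

-- ===== LEMMAS AND PROOFS =====

-- reference form of Python's s.split('.') on List Char, used only in the proofs
def pvSplitc : List Char → List (List Char)
  | [] => [[]]
  | x :: rest => if x = '.' then [] :: pvSplitc rest else (pvSplitc rest).modifyHead (x :: ·)

theorem pvSplitc_ne_nil (s : List Char) : pvSplitc s ≠ [] := by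
  induction s with
  | nil => simp [pvSplitc]
  | cons x rest ih =>
    by_cases h : x = '.'
    · simp [pvSplitc, h]
    · simp only [pvSplitc, h, if_false, ne_eq, List.modifyHead_eq_nil_iff]
      exact ih

theorem pvGo_spec (fuel : Nat) (l cur : List Char) (acc : List (List Char))
    (h : l.length < fuel) :
    PySem.Chars.splitOn.go ['.'] fuel l cur acc =
      acc.reverse ++ (pvSplitc l).modifyHead (cur.reverse ++ ·) := by
  induction fuel generalizing l cur acc with
  | zero => omega
  | succ f ih =>
    cases l with
    | nil => simp [PySem.Chars.splitOn.go, pvSplitc]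
    | cons c rest =>
      by_cases hc : c = '.'
      · subst hc
        have : (['.'] : List Char).isPrefixOf ('.' :: rest) = true := by
          simp [List.isPrefixOf]
        rw [PySem.Chars.splitOn.go]
        simp only [this, if_true, List.length_cons] at *
        rw [show List.drop (([] : List Char).length + 1) ('.' :: rest) = rest by simp]
        rw [ih rest [] (cur.reverse :: acc) (by omega)]
        have hid : List.modifyHead (fun x => x) (pvSplitc rest) = pvSplitc rest := by
          cases pvSplitc rest <;> rfl
        simp [pvSplitc, hid]
      · have : (['.'] : List Char).isPrefixOf (c :: rest) = false := by
          simp [List.isPrefixOf]; intro h'; exact hc h'.symm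
        rw [PySem.Chars.splitOn.go]
        simp only [this, Bool.false_eq_true, if_false]
        rw [ih rest (c :: cur) acc (by simpa using Nat.lt_of_succ_lt_succ h)]
        obtain ⟨p, t, hp⟩ : ∃ p t, pvSplitc rest = p :: t := by
          cases hq : pvSplitc rest with
          | nil => exact absurd hq (pvSplitc_ne_nil rest)
          | cons p t => exact ⟨p, t, rfl⟩
        simp [pvSplitc, hc, hp, List.modifyHead]

theorem pvSplitOn_eq (s : List Char) : PySem.Chars.splitOn s ['.'] = pvSplitc s := by
  rw [PySem.Chars.splitOn, pvGo_spec _ _ _ _ (by omega)]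
  obtain ⟨p, t, hp⟩ : ∃ p t, pvSplitc s = p :: t := by
    cases hq : pvSplitc s with
    | nil => exact absurd hq (pvSplitc_ne_nil s)
    | cons p t => exact ⟨p, t, rfl⟩
  simp [hp, List.modifyHead]

theorem pvJoin_splitc (s : List Char) : PySem.Chars.join ['.'] (pvSplitc s) = s := by
  induction s with
  | nil => simp [pvSplitc, PySem.Chars.join_singleton]
  | cons x rest ih =>
    by_cases h : x = '.'
    · subst h
      obtain ⟨p, t, hp⟩ : ∃ p t, pvSplitc rest = p :: t := by
        cases hq : pvSplitc rest with
        | nil => exact absurd hq (pvSplitc_ne_nil rest)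
        | cons p t => exact ⟨p, t, rfl⟩
      simp only [pvSplitc, if_true, hp]
      rw [PySem.Chars.join_cons_cons]
      rw [hp] at ih; rw [ih]; rfl
    · obtain ⟨p, t, hp⟩ : ∃ p t, pvSplitc rest = p :: t := by
        cases hq : pvSplitc rest with
        | nil => exact absurd hq (pvSplitc_ne_nil rest)
        | cons p t => exact ⟨p, t, rfl⟩
      simp only [pvSplitc, h, if_false, hp, List.modifyHead]
      cases t with
      | nil =>
        rw [hp] at ih
        rw [PySem.Chars.join_singleton] at ih ⊢
        simp [ih]
      | cons q u =>
        rw [PySem.Chars.join_cons_cons]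
        rw [hp, PySem.Chars.join_cons_cons] at ih
        simp [← ih]

theorem pvSplitc_star (p : List Char) : pvSplitc ('*' :: '.' :: p) = ['*'] :: pvSplitc p := by
  obtain ⟨q, t, hq⟩ : ∃ q t, pvSplitc p = q :: t := by
    cases hh : pvSplitc p with
    | nil => exact absurd hh (pvSplitc_ne_nil p)
    | cons q t => exact ⟨q, t, rfl⟩
  simp [pvSplitc, hq]

-- String-level split: (x.split('.')) as a list of Strings
theorem pvStrSplit_eq (x : String) :
    (PySem.Str.split? x ".").getD [] = (pvSplitc x.toList).map String.ofList := by
  rw [PySem.Str.split?]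
  simp [PySem.Chars.split?, pvSplitOn_eq]

theorem pvStrJoin_ofList (l : List (List Char)) :
    PySem.Str.join "." (l.map String.ofList) = String.ofList (PySem.Chars.join ['.'] l) := by
  rw [PySem.Str.join]
  congr 1
  simp [List.map_map, Function.comp_def]

-- P: one entry of the list matches A's loop test (exact, or wildcard against the target's parent)
def pvP (domain_r : List String) (target_domain : String) (x : String) : Bool :=
  target_domain == x ||
    (((PySem.Str.split? x ".").getD []).headD "" == "*" &&
      (PySem.Str.join "." (domain_r.drop 1) ==
        PySem.Str.join "." ((((PySem.Str.split? x ".").getD []).drop 1))))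

-- characterization of A's wildcard test: the only entries it can accept are '*' and '*.'+parent
theorem pvP_iff (target x : String) :
    pvP ((PySem.Str.split? target ".").getD []) target x = true ↔
      (x = target ∨
        (x = "*" ∧ PySem.Str.join "." ((((PySem.Str.split? target ".").getD []).drop 1)) = "") ∨
        x = PySem.Str.join "." ["*",
          PySem.Str.join "." ((((PySem.Str.split? target ".").getD []).drop 1))]) := by
  set parent := PySem.Str.join "." ((((PySem.Str.split? target ".").getD []).drop 1)) with hparent
  have hwc : (PySem.Str.join "." ["*", parent]).toList = '*' :: '.' :: parent.toList := by
    rw [PySem.Str.join]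
    rw [show ((["*", parent] : List String).map String.toList) = [['*'], parent.toList] by rfl]
    rw [PySem.Chars.join_cons_cons, PySem.Chars.join_singleton]
    simp
  constructor
  · intro h
    rw [pvP, Bool.or_eq_true, Bool.and_eq_true] at h
    rcases h with h | ⟨h1, h2⟩
    · exact Or.inl (beq_iff_eq.mp h).symm
    · -- wildcard branch
      rw [pvStrSplit_eq x] at h1 h2
      obtain ⟨p, t, hp⟩ : ∃ p t, pvSplitc x.toList = p :: t := by
        cases hq : pvSplitc x.toList with
        | nil => exact absurd hq (pvSplitc_ne_nil _)
        | cons p t => exact ⟨p, t, rfl⟩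
      rw [hp] at h1 h2
      simp only [List.map_cons, List.headD_cons, beq_iff_eq] at h1
      have hpstar : p = ['*'] := by
        have := congrArg String.toList h1; simpa using this
      have hx : x = String.ofList (PySem.Chars.join ['.'] (p :: t)) := by
        rw [← hp, pvJoin_splitc]; simp
      cases t with
      | nil =>
        refine Or.inr (Or.inl ⟨?_, ?_⟩)
        · rw [hx, hpstar, PySem.Chars.join_singleton]
        · simp only [beq_iff_eq] at h2
          rw [hparent, h2]
          subst hpstar
          decide
      | cons q u =>
        refine Or.inr (Or.inr ?_)
        simp only [List.map_cons, List.drop_succ_cons, List.drop_zero, beq_iff_eq] at h2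
        have hjoin : PySem.Str.join "." ((q :: u).map String.ofList) = parent := by
          rw [hparent, h2]; rfl
        rw [pvStrJoin_ofList] at hjoin
        have hx2 : x = String.ofList ('*' :: '.' :: PySem.Chars.join ['.'] (q :: u)) := by
          rw [hx, hpstar, PySem.Chars.join_cons_cons]; rfl
        apply String.toList_injective
        rw [hwc, hx2]
        have : parent.toList = PySem.Chars.join ['.'] (q :: u) := by
          rw [← hjoin]; simp
        simp [this]
  · intro h
    rcases h with h | h | h
    · subst h; simp [pvP]
    · -- x = '*' and parent = ""
      obtain ⟨hx, hpe⟩ := h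
      subst hx
      rw [pvP, Bool.or_eq_true]
      right
      rw [pvStrSplit_eq "*", Bool.and_eq_true]
      have hsp : pvSplitc "*".toList = [['*']] := by decide
      rw [hsp]
      refine ⟨by simp, ?_⟩
      simp only [List.map_cons, List.map_nil, List.drop_succ_cons, List.drop_zero, beq_iff_eq]
      rw [← hparent, hpe]
      decide
    · -- x = wildcard candidate
      subst h
      rw [pvP, Bool.or_eq_true]
      right
      rw [Bool.and_eq_true]
      rw [pvStrSplit_eq (PySem.Str.join "." ["*", parent]), hwc, show pvSplitc ('*' :: '.' :: parent.toList) = ['*'] :: pvSplitc parent.toList from pvSplitc_star _]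
      constructor
      · simp
      · simp only [List.map_cons, List.drop_succ_cons, List.drop_zero, beq_iff_eq]
        rw [pvStrJoin_ofList, pvJoin_splitc]
        simp only [String.ofList_toList]
        rw [hparent, List.drop_one]

theorem pvIf_or (a b : Bool) (r : Int) :
    (if a then (1:Int) else if b then 1 else r) = if (a || b) then 1 else r := by
  cases a <;> cases b <;> simp

theorem pvLoopA_eq_any (domain_r : List String) (target_domain : String) (xs : List String) :
    pvLoopA domain_r target_domain xs =
      (if xs.any (pvP domain_r target_domain) then 1 else 0) := by
  induction xs with
  | nil => simp [pvLoopA]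
  | cons x rest ih =>
    show (if target_domain == x then (1:Int)
      else if ((PySem.Str.split? x ".").getD []).headD "" == "*" &&
        (PySem.Str.join "." (domain_r.drop 1) ==
          PySem.Str.join "." ((((PySem.Str.split? x ".").getD []).drop 1))) then 1
      else pvLoopA domain_r target_domain rest) = _
    rw [pvIf_or, ih, List.any_cons]
    exact pvIf_or _ _ 0

theorem pvCond_eq (xs : List String) (target : String) :
    (xs.contains "*" || xs.any (pvP ((PySem.Str.split? target ".").getD []) target)) =
    (["*", target, PySem.Str.join "." ["*",
        PySem.Str.join "." ((((PySem.Str.split? target ".").getD []).drop 1))]].any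
      (fun c => xs.contains c)) := by
  have h : ∀ (a b : Bool), ((a = true) ↔ (b = true)) → a = b := by decide
  apply h
  simp only [List.any_cons, List.any_nil, Bool.or_eq_true, Bool.or_false,
    List.contains_eq_mem, decide_eq_true_eq, List.any_eq_true]
  constructor
  · rintro (hstar | ⟨x, hx, hp⟩)
    · exact Or.inl hstar
    · rcases (pvP_iff target x).mp hp with h | ⟨h, -⟩ | h
      · subst h; exact Or.inr (Or.inl hx)
      · subst h; exact Or.inl hx
      · subst h; exact Or.inr (Or.inr hx)
  · rintro (hstar | htd | hwc)
    · exact Or.inl hstar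
    · exact Or.inr ⟨target, htd, (pvP_iff target target).mpr (Or.inl rfl)⟩
    · exact Or.inr ⟨_, hwc, (pvP_iff target _).mpr (Or.inr (Or.inr rfl))⟩

theorem i_domain_permission_validator_main (ruleset : List (String × List String)) (rule_section : String) (target_domain : String) :
    i_domain_permission_validator ruleset rule_section target_domain =
      i_domain_permission_validator_alt ruleset rule_section target_domain := by
  rw [i_domain_permission_validator, i_domain_permission_validator_alt]
  by_cases hc : (PySem.Dict.mk ruleset).contains rule_section
  · simp only [hc, Bool.not_true, Bool.false_eq_true, if_false]
    rw [pvLoopA_eq_any, pvIf_or, pvCond_eq]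
  · simp only [Bool.not_eq_true] at hc
    simp only [hc, Bool.not_false, if_true]

-- ===== VERDICT (by name: the statement is the Claim_ definition above) =====
theorem i_domain_permission_validator_spec : Claim_equal_i_domain_permission_validator := by
  intro ruleset rule_section target_domain _
  unfold Spec_i_domain_permission_validator
  exact i_domain_permission_validator_main ruleset rule_section target_domain
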